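-- pv_equiv track=rewrite | github.com/dineshkrishnareddy/loktra-test | task1.py | get_string_length
-- ===== SOURCE A (Python) =====
-- VALID_CHARACTERS = 'acdegilmnoprstuw'
--
-- FIRST_CHARACTER = VALID_CHARACTERS[0]
--
-- def compute_hash(string):
--     h = 7
--     for char in string:
--         h = h * 37 + VALID_CHARACTERS.index(char)
--     return h
--
-- def get_string_length(hash_length):
--     string_length = 0
--     while True:
--         current_string = FIRST_CHARACTER * (string_length + 1)
--         current_hash = compute_hash(current_string)
--         if len(str(current_hash)) > hash_length:
--             break
--         string_length += 1
--     return string_length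
-- ===== SOURCE B (Python) =====
-- def get_string_length(hash_length):
--     # The hash of the n-character candidate string is 7 * 37**n, so keep a
--     # running product instead of rebuilding the string and rehashing it.
--     length = 0
--     h = 7 * 37
--     while len(str(h)) <= hash_length:
--         h *= 37
--         length += 1
--     return length
-- ===== Notes on version B (the rewrite author's own statement) =====
-- stated objective: faster
-- what changed: B replaces A's per-iteration string construction plus full compute_hash rescan with a single loop maintaining the running hash value (one big-int multiplication per step).
import Mathlib
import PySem

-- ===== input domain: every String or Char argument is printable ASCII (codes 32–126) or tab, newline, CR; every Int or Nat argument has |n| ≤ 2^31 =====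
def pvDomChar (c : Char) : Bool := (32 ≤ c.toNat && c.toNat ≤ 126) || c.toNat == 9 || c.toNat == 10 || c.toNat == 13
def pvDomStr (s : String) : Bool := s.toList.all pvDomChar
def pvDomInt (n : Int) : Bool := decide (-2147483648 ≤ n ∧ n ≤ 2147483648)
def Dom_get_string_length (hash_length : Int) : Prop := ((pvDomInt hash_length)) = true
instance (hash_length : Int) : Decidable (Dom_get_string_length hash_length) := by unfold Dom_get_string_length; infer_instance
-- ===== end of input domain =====

-- B replaces A's per-iteration string build + full compute_hash rescan with one
-- loop holding the running hash value (one multiplication per step).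

-- ===== PORT A =====
def VALID_CHARACTERS : String := "acdegilmnoprstuw"

-- FIRST_CHARACTER = VALID_CHARACTERS[0] = 'a'
def FIRST_CHARACTER : Char := 'a'

-- Python .index raises ValueError on an absent char; the `.getD 0` default is
-- never taken on the all-'a' strings A feeds this helper.
def compute_hash (string : List Char) : Int :=
  string.foldl (fun h c => h * 37 + (((PySem.List.index? VALID_CHARACTERS.toList c).getD 0 : Nat) : Int)) 7

-- A's `while True` loop; the fuel argument is a totality guard only (the hash
-- gains at least one digit per step, so the loop exits within this bound).
def pvLoopA (hash_length : Int) : Nat → Nat → Int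
  | 0, string_length => (string_length : Int)
  | fuel+1, string_length =>
      let current_string := List.replicate (string_length + 1) FIRST_CHARACTER
      let current_hash := compute_hash current_string
      if ((PySem.Int.toStr current_hash).length : Int) > hash_length then (string_length : Int)
      else pvLoopA hash_length fuel (string_length + 1)

def get_string_length (hash_length : Int) : Int :=
  pvLoopA hash_length (hash_length + 2).toNat 0

-- ===== PORT B =====
-- B's single accumulator loop; same totality-guard fuel.
def pvLoopB (hash_length : Int) : Nat → Int → Nat → Int
  | 0, _, length => (length : Int)
  | fuel+1, h, length =>
      if ((PySem.Int.toStr h).length : Int) ≤ hash_length then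
        pvLoopB hash_length fuel (h * 37) (length + 1)
      else (length : Int)

def get_string_length_alt (hash_length : Int) : Int :=
  pvLoopB hash_length (hash_length + 2).toNat (7 * 37) 0

-- ===== PRECONDITION & SPEC =====
def Spec_get_string_length (hash_length : Int) (out : Int) : Prop := out = get_string_length_alt hash_length
instance (hash_length : Int) (out : Int) : Decidable (Spec_get_string_length hash_length out) := by unfold Spec_get_string_length; infer_instance

-- ===== CLAIM (what is proved, stated in full; the proofs are below) =====
def Claim_equal_get_string_length : Prop := ∀ (hash_length : Int), Dom_get_string_length hash_length → Spec_get_string_length hash_length (get_string_length hash_length)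

-- ===== LEMMAS AND PROOFS =====

lemma hash_succ (n : Nat) :
    compute_hash (List.replicate (n + 1) 'a') = compute_hash (List.replicate n 'a') * 37 := by
  rw [List.replicate_succ']
  simp [compute_hash, List.foldl_append]

lemma loop_eq (hl : Int) : ∀ (fuel n : Nat),
    pvLoopA hl fuel n = pvLoopB hl fuel (compute_hash (List.replicate (n + 1) 'a')) n := by
  intro fuel
  induction fuel with
  | zero => intro n; rfl
  | succ f ih =>
      intro n
      simp only [pvLoopA, pvLoopB, FIRST_CHARACTER]
      by_cases hle :
          (((PySem.Int.toStr (compute_hash (List.replicate (n + 1) 'a'))).length : Int) ≤ hl)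
      · rw [if_neg (by omega), if_pos hle, ih (n + 1), hash_succ (n + 1)]
      · rw [if_pos (by omega), if_neg hle]

-- ===== VERDICT (by name: the statement is the Claim_ definition above) =====
theorem get_string_length_spec : Claim_equal_get_string_length := by
  intro hl _
  unfold Spec_get_string_length get_string_length get_string_length_alt
  rw [loop_eq]
  norm_num [compute_hash]
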